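-- pv_equiv track=rewrite | github.com/aleksiej-ostrowski/leetcode | 205.py | isEqMap
-- ===== SOURCE A (Python) =====
-- def isEqMap(s: str, t: str) -> bool:
--     research = {}
--     for s_ind, s_elm in enumerate(s):
--         if s_elm in research:
--             if research[s_elm] != t[s_ind]:
--                 return False
--         else:
--             research[s_elm] = t[s_ind]
--     return True
-- ===== SOURCE B (Python) =====
-- def isEqMap(s: str, t: str) -> bool:
--     pairs = {(c, t[i]) for i, c in enumerate(s)}
--     return len(pairs) == len(set(s))
-- ===== Notes on version B (the rewrite author's own statement) =====
-- stated objective: alternative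
-- what changed: Replaces A's incremental dict with a conflict check per character by a counting argument: build the set of (source,target) pairs and the set of source characters and compare their cardinalities, which are equal exactly when the mapping is a function.
-- outside the precondition, e.g. on isEqMap('aab', 'bc'): A returns False, B raises IndexError
import Mathlib
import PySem

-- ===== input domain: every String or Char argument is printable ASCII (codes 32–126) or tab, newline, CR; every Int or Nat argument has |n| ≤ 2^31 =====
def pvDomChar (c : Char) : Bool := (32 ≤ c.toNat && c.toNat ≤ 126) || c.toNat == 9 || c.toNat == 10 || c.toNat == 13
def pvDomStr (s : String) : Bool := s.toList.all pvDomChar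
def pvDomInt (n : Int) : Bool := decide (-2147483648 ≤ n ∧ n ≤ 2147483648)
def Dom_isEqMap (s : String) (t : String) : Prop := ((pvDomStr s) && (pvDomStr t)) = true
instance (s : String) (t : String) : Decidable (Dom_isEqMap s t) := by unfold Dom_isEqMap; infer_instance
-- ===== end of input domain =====

-- B replaces A's incremental dict-and-conflict scan by a counting argument: the set of
-- (source, target) pairs has the same size as the set of source characters iff the
-- mapping is consistent.  Objective: alternative (different algorithm, same cost).

-- ===== PORT A =====
-- A's loop: research dict; for (s_ind, s_elm) in enumerate(s); t[s_ind] → pyGet? (none = IndexError, outside Pre_).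
def isEqMapLoopA (ts : List Char) (d : PySem.Dict Char Char) : List (Int × Char) → Bool
  | [] => true
  | (i, c) :: rest =>
    match PySem.List.pyGet? ts i with
    | none => false        -- IndexError on t[s_ind]; excluded by Pre_isEqMap
    | some v =>
      match PySem.Dict.get? d c with
      | some w => if w != v then false else isEqMapLoopA ts d rest
      | none => isEqMapLoopA ts (d.insert c v) rest

def isEqMap (s : String) (t : String) : Bool :=
  isEqMapLoopA t.toList PySem.Dict.empty (PySem.List.enumerate s.toList 0)

-- ===== PORT B =====
-- B's set comprehension {(c, t[i]) for i, c in enumerate(s)}; t[i] → pyGet? (none = IndexError, outside Pre_).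
def isEqMapPairsB (ts : List Char) : List (Int × Char) → PySem.Set (Char × Char) → Option (PySem.Set (Char × Char))
  | [], acc => some acc
  | (i, c) :: rest, acc =>
    match PySem.List.pyGet? ts i with
    | none => none         -- IndexError on t[i]; excluded by Pre_isEqMap
    | some v => isEqMapPairsB ts rest (PySem.Set.add acc (c, v))

def isEqMap_alt (s : String) (t : String) : Bool :=
  match isEqMapPairsB t.toList (PySem.List.enumerate s.toList 0) PySem.Set.empty with
  | none => false          -- unreachable under Pre_isEqMap
  | some pairs => PySem.Set.len pairs == PySem.Set.len (PySem.Set.ofList s.toList)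

-- ===== PRECONDITION & SPEC =====
-- Pre_ requires len(s) ≤ len(t): on shorter t, A raises IndexError unless an earlier mapping
-- conflict makes it return False first, while B's full set comprehension always raises there —
-- Pre_ therefore also excludes inputs (e.g. ("aab","bc")) on which A still returns False.
def Pre_isEqMap (s : String) (t : String) : Prop :=
  s.toList.length ≤ t.toList.length
instance (s : String) (t : String) : Decidable (Pre_isEqMap s t) := by
  unfold Pre_isEqMap; infer_instance

def pvWitness_isEqMap : String × String := ("ab", "cd")

def Spec_isEqMap (s : String) (t : String) (out : Bool) : Prop := out = isEqMap_alt s t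
instance (s : String) (t : String) (out : Bool) : Decidable (Spec_isEqMap s t out) := by unfold Spec_isEqMap; infer_instance

-- ===== CLAIM (what is proved, stated in full; the proofs are below) =====
def Claim_equal_isEqMap : Prop := ∀ (s : String) (t : String), Dom_isEqMap s t → Pre_isEqMap s t → Spec_isEqMap s t (isEqMap s t)

-- ===== LEMMAS AND PROOFS =====

-- Proof-side view of A's loop on the explicit list of (source, target) pairs.
def loopP (d : PySem.Dict Char Char) : List (Char × Char) → Bool
  | [] => true
  | (c, v) :: rest =>
    match PySem.Dict.get? d c with
    | some w => if w != v then false else loopP d rest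
    | none => loopP (d.insert c v) rest

-- The consistency property both programs decide.
def Func (L : List (Char × Char)) : Prop :=
  ∀ p ∈ L, ∀ q ∈ L, p.1 = q.1 → p.2 = q.2

-- A's loop over enumerate(s) with t[i] is loopP over zip, once every index is in range.
theorem loopA_eq_loopP (ts : List Char) :
    ∀ (u : List Char) (k : Nat) (d : PySem.Dict Char Char),
      k + u.length ≤ ts.length →
      isEqMapLoopA ts d (PySem.List.enumerate u (k : Int)) = loopP d (u.zip (ts.drop k)) := by
  intro u
  induction u with
  | nil => intro k d _; simp [PySem.List.enumerate_nil, isEqMapLoopA, loopP]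
  | cons c u' ih =>
    intro k d hk
    have hklt : k < ts.length := by simp at hk; omega
    rw [PySem.List.enumerate_cons, isEqMapLoopA]
    have hget : PySem.List.pyGet? ts ((k : Int)) = some ts[k] := by
      rw [PySem.List.pyGet?_natCast, List.getElem?_eq_getElem hklt]
    simp only [hget]
    have hdrop : ts.drop k = ts[k] :: ts.drop (k + 1) :=
      (List.drop_eq_getElem_cons hklt)
    rw [hdrop, List.zip_cons_cons, loopP]
    have hcast : ((k : Int) + 1) = ((k + 1 : Nat) : Int) := by push_cast; ring
    have hk' : k + 1 + u'.length ≤ ts.length := by simp at hk; omega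
    cases PySem.Dict.get? d c with
    | none => simp only []; rw [hcast, ih (k + 1) (d.insert c ts[k]) hk']
    | some w =>
      simp only []
      by_cases hw : w = ts[k]
      · simp only [hw, bne_self_eq_false, Bool.false_eq_true, if_false]
        rw [hcast, ih (k + 1) d hk']
      · have : (w != ts[k]) = true := by simp [hw]
        rw [this]; simp

-- B's set comprehension over enumerate(s) with t[i] builds the fold of Set.add over zip.
theorem pairsB_eq_fold (ts : List Char) :
    ∀ (u : List Char) (k : Nat) (acc : PySem.Set (Char × Char)),
      k + u.length ≤ ts.length →
      isEqMapPairsB ts (PySem.List.enumerate u (k : Int)) acc =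
        some ((u.zip (ts.drop k)).foldl PySem.Set.add acc) := by
  intro u
  induction u with
  | nil => intro k acc _; simp [PySem.List.enumerate_nil, isEqMapPairsB]
  | cons c u' ih =>
    intro k acc hk
    have hklt : k < ts.length := by simp at hk; omega
    rw [PySem.List.enumerate_cons, isEqMapPairsB]
    have hget : PySem.List.pyGet? ts ((k : Int)) = some ts[k] := by
      rw [PySem.List.pyGet?_natCast, List.getElem?_eq_getElem hklt]
    simp only [hget]
    have hdrop : ts.drop k = ts[k] :: ts.drop (k + 1) :=
      (List.drop_eq_getElem_cons hklt)
    have hcast : ((k : Int) + 1) = ((k + 1 : Nat) : Int) := by push_cast; ring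
    have hk' : k + 1 + u'.length ≤ ts.length := by simp at hk; omega
    rw [hdrop, List.zip_cons_cons, List.foldl_cons, hcast,
      ih (k + 1) (PySem.Set.add acc (c, ts[k])) hk']

-- loopP with dict d succeeds iff the pair list is functional and consistent with d.
theorem loopP_char (L : List (Char × Char)) :
    ∀ d : PySem.Dict Char Char,
      loopP d L = true ↔
        (Func L ∧ ∀ p ∈ L, ∀ v, PySem.Dict.get? d p.1 = some v → v = p.2) := by
  induction L with
  | nil => intro d; simp [loopP, Func]
  | cons hd tl ih =>
    intro d
    obtain ⟨c, v⟩ := hd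
    rw [loopP]
    cases hg : PySem.Dict.get? d c with
    | some w =>
      dsimp only
      by_cases hw : w = v
      · subst hw
        simp only [bne_self_eq_false, Bool.false_eq_true, if_false, ih d]
        constructor
        · rintro ⟨hf, hc⟩
          refine ⟨?_, ?_⟩
          · intro p hp q hq hpq
            rcases List.mem_cons.mp hp with hp | hp <;>
              rcases List.mem_cons.mp hq with hq | hq
            · rw [hp, hq]
            · subst hp
              exact (hc q hq w (by rw [← hpq]; exact hg)).symm ▸
                (hc q hq w (by rw [← hpq]; exact hg))
            · subst hq
              exact (hc p hp w (by rw [hpq]; exact hg)).symm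
            · exact hf p hp q hq hpq
          · intro p hp v' hv'
            rcases List.mem_cons.mp hp with hp | hp
            · subst hp; simp only [hg] at hv'; simp_all
            · exact hc p hp v' hv'
        · rintro ⟨hf, hc⟩
          refine ⟨?_, ?_⟩
          · intro p hp q hq hpq
            exact hf p (List.mem_cons_of_mem _ hp) q (List.mem_cons_of_mem _ hq) hpq
          · intro p hp v' hv'
            exact hc p (List.mem_cons_of_mem _ hp) v' hv'
      · have hwv : (w != v) = true := by simp [hw]
        rw [hwv]
        simp only [if_true, Bool.false_eq_true, false_iff]
        rintro ⟨_, hc⟩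
        exact hw (hc (c, v) List.mem_cons_self w hg)
    | none =>
      dsimp only
      rw [ih (d.insert c v)]
      constructor
      · rintro ⟨hf, hc⟩
        refine ⟨?_, ?_⟩
        · intro p hp q hq hpq
          rcases List.mem_cons.mp hp with hp | hp <;>
            rcases List.mem_cons.mp hq with hq | hq
          · rw [hp, hq]
          · subst hp
            have := hc q hq v (by
              have : q.1 = c := by rw [← hpq]
              rw [this, PySem.Dict.get?_insert_self])
            simpa using this
          · subst hq
            have := hc p hp v (by
              have : p.1 = c := by rw [hpq]
              rw [this, PySem.Dict.get?_insert_self])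
            simpa using this.symm
          · exact hf p hp q hq hpq
        · intro p hp v' hv'
          rcases List.mem_cons.mp hp with hp | hp
          · subst hp; simp_all
          · by_cases hpc : p.1 = c
            · have := hc p hp v (by rw [hpc, PySem.Dict.get?_insert_self])
              rw [hpc, hg] at hv'; cases hv'
            · exact hc p hp v' (by rw [PySem.Dict.get?_insert_of_ne d v hpc]; exact hv')
      · rintro ⟨hf, hc⟩
        refine ⟨?_, ?_⟩
        · intro p hp q hq hpq
          exact hf p (List.mem_cons_of_mem _ hp) q (List.mem_cons_of_mem _ hq) hpq
        · intro p hp v' hv'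
          by_cases hpc : p.1 = c
          · rw [hpc, PySem.Dict.get?_insert_self] at hv'
            have := hf (c, v) List.mem_cons_self p (List.mem_cons_of_mem _ hp) (by simp [hpc])
            simp at this
            rw [← Option.some.inj hv', this]
          · exact hc p (List.mem_cons_of_mem _ hp) v' (by rwa [PySem.Dict.get?_insert_of_ne d v hpc] at hv')

-- Cardinality of a Set.ofList as a Finset card.
theorem len_ofList_eq_card {α : Type} [BEq α] [LawfulBEq α] [DecidableEq α] (xs : List α) :
    (PySem.Set.ofList xs).length = xs.toFinset.card := by
  have hn : (PySem.Set.ofList xs).Nodup := PySem.Set.nodup_ofList xs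
  have hext : (PySem.Set.ofList xs).toFinset = xs.toFinset := by
    ext x; simp [List.mem_toFinset, PySem.Set.mem_ofList]
  rw [← hext, List.toFinset_card_of_nodup hn]

-- The counting criterion: equal set sizes iff the pair list is functional.
theorem card_eq_iff_func (L : List (Char × Char)) :
    ((PySem.Set.ofList L).length = (PySem.Set.ofList (L.map Prod.fst)).length) ↔ Func L := by
  rw [len_ofList_eq_card, len_ofList_eq_card]
  have hmapset : (L.map Prod.fst).toFinset = L.toFinset.image Prod.fst := by ext x; simp
  rw [hmapset, eq_comm, Finset.card_image_iff]
  constructor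
  · intro hinj p hp q hq hpq
    have := hinj (List.mem_toFinset.mpr hp) (List.mem_toFinset.mpr hq) hpq
    rw [this]
  · intro hf p hp q hq hpq
    have h2 := hf p (List.mem_toFinset.mp hp) q (List.mem_toFinset.mp hq) hpq
    exact Prod.ext hpq h2

-- ===== VERDICT (by name: the statement is the Claim_ definition above) =====
theorem isEqMap_spec : Claim_equal_isEqMap := by
  intro s t _ hpre
  unfold Spec_isEqMap isEqMap isEqMap_alt
  have hlen : s.toList.length ≤ t.toList.length := hpre
  have hA := loopA_eq_loopP t.toList s.toList 0 PySem.Dict.empty (by simpa using hlen)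
  have hB := pairsB_eq_fold t.toList s.toList 0 PySem.Set.empty (by simpa using hlen)
  simp only [Nat.cast_zero] at hA hB
  rw [hA, hB, List.drop_zero] at *
  set L := s.toList.zip t.toList with hL
  have hfold : L.foldl PySem.Set.add PySem.Set.empty = PySem.Set.ofList L :=
    (PySem.Set.ofList_eq_foldl L).symm
  rw [hfold]
  have hmap : L.map Prod.fst = s.toList := List.map_fst_zip hlen
  have hchar := (loopP_char L PySem.Dict.empty).trans
    (by
      constructor
      · rintro ⟨hf, _⟩; exact hf
      · intro hf; exact ⟨hf, by intro p _ v hv; simp [PySem.Dict.get?_empty] at hv⟩)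
  have hcard := card_eq_iff_func L
  rw [← hmap]
  simp only [PySem.Set.len]
  cases hlp : loopP PySem.Dict.empty L with
  | true =>
    have hf : Func L := hchar.mp hlp
    have := hcard.mpr hf
    simp [this]
  | false =>
    have hf : ¬ Func L := fun h => by rw [hchar.mpr h] at hlp; cases hlp
    have : (PySem.Set.ofList L).length ≠ (PySem.Set.ofList (L.map Prod.fst)).length :=
      fun h => hf (hcard.mp h)
    simp [this]
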